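-- pv_equiv track=rewrite | github.com/soduco/paper-nestedner-icdar23-code | m0_flat_ner/tools.py | getSubsetStats
-- ===== SOURCE A (Python) =====
-- def getSubsetStats(set_):
--     stats = []
--
--     #init counters
--     per = 0
--     act = 0
--     titre = 0
--     loc = 0
--     ft = 0
--     cardinal = 0
--
--     for i in range(len(set_)):
--         per += set_[i][0].count('<PER>')
--         act += set_[i][0].count('<ACT>')
--         titre += set_[i][0].count('<TITRE>')
--         titre += set_[i][0].count('<TITREH>')
--         titre += set_[i][0].count('<TITREP>')
--         loc += set_[i][0].count('<LOC>')
--         ft += set_[i][0].count('<FT>')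
--         cardinal += set_[i][0].count('<CARDINAL>')
--
--     return {
--         "PER":per,
--         "ACT":act,
--         "TITRE":titre,
--         "LOC":loc,
--         "FT":ft,
--         "CARDINAL":cardinal,
--         }
-- ===== SOURCE B (Python) =====
-- TAG_KEY = [
--     ("<PER>", "PER"), ("<ACT>", "ACT"),
--     ("<TITRE>", "TITRE"), ("<TITREH>", "TITRE"), ("<TITREP>", "TITRE"),
--     ("<LOC>", "LOC"), ("<FT>", "FT"), ("<CARDINAL>", "CARDINAL"),
-- ]
--
-- KEYS = ["PER", "ACT", "TITRE", "LOC", "FT", "CARDINAL"]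
--
--
-- def getSubsetStats(set_):
--     # Tokenize: scan each text once, emitting the entity key of every tag
--     # occurrence found at a position; then tally the emitted keys.
--     # (Equal to per-tag substring counting: a tag contains '<' only at its
--     # start, so occurrences of a tag never overlap.)
--     hits = [key
--             for row in set_
--             for i in range(len(row[0]))
--             for tag, key in TAG_KEY
--             if row[0].startswith(tag, i)]
--     return {key: hits.count(key) for key in KEYS}
-- ===== Notes on version B (the rewrite author's own statement) =====
-- stated objective: alternative
-- what changed: Replaces the six per-tag substring-count accumulators with a single tokenizer pass: scan each text position once, emit the entity key of any tag starting there into a hit stream, then tally the stream per key (correct because tags contain '<' only at their start, so tag occurrences never overlap).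
import Mathlib
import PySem

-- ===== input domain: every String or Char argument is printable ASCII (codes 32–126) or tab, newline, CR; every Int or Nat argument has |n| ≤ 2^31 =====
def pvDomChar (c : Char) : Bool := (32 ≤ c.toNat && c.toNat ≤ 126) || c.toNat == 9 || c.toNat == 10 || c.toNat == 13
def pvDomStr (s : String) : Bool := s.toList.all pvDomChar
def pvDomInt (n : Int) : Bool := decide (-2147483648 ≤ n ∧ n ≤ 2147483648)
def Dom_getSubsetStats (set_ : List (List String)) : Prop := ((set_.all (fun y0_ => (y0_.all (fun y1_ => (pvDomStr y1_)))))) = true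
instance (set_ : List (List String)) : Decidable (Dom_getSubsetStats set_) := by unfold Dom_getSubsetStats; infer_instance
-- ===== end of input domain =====

-- B replaces the per-tag substring-count accumulators with a tokenizer pass: scan each text position once,
-- emit the entity key of any tag starting there, then tally the emitted keys (alternative algorithm, same cost).

-- ===== PORT A =====
-- state is (per, act, titre, loc, ft, cardinal); set_[i] via pyGetD (i always in range), row[0] via pyGetD (in range by Pre_)
def getSubsetStats (set_ : List (List String)) : List (String × Int) :=
  let st : Int × Int × Int × Int × Int × Int :=
    (PySem.List.pyRange 0 (set_.length : Int) 1).foldl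
      (fun acc i =>
        let s := PySem.List.pyGetD (PySem.List.pyGetD set_ i []) 0 ""
        (acc.1 + (PySem.Str.count s "<PER>" : Int),
         acc.2.1 + (PySem.Str.count s "<ACT>" : Int),
         acc.2.2.1 + (PySem.Str.count s "<TITRE>" : Int)
                   + (PySem.Str.count s "<TITREH>" : Int)
                   + (PySem.Str.count s "<TITREP>" : Int),
         acc.2.2.2.1 + (PySem.Str.count s "<LOC>" : Int),
         acc.2.2.2.2.1 + (PySem.Str.count s "<FT>" : Int),
         acc.2.2.2.2.2 + (PySem.Str.count s "<CARDINAL>" : Int)))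
      (0, 0, 0, 0, 0, 0)
  [("PER", st.1), ("ACT", st.2.1), ("TITRE", st.2.2.1),
   ("LOC", st.2.2.2.1), ("FT", st.2.2.2.2.1), ("CARDINAL", st.2.2.2.2.2)]

-- ===== PORT B =====
def tagKey : List (String × String) :=
  [("<PER>", "PER"), ("<ACT>", "ACT"),
   ("<TITRE>", "TITRE"), ("<TITREH>", "TITRE"), ("<TITREP>", "TITRE"),
   ("<LOC>", "LOC"), ("<FT>", "FT"), ("<CARDINAL>", "CARDINAL")]

def keys6 : List String := ["PER", "ACT", "TITRE", "LOC", "FT", "CARDINAL"]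

-- the comprehension over (row, i, (tag, key)) with its filter; s.startswith(tag, i) is exact as a
-- prefix test on s.toList.drop i.toNat since every i drawn from range(len(s)) is nonnegative
def getSubsetStats_alt (set_ : List (List String)) : List (String × Int) :=
  let hits : List String :=
    set_.flatMap (fun row =>
      let s := PySem.List.pyGetD row 0 ""
      (PySem.List.pyRange 0 (PySem.Str.len s) 1).flatMap (fun i =>
        tagKey.filterMap (fun tk =>
          if tk.1.toList.isPrefixOf (s.toList.drop i.toNat) then some tk.2 else none)))
  keys6.map (fun k => (k, (PySem.List.count hits k : Int)))

-- ===== PRECONDITION & SPEC =====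
-- Pre_ excludes inputs containing an empty row, on which A's set_[i][0] raises IndexError (B raises there too).
def Pre_getSubsetStats (set_ : List (List String)) : Prop := ∀ row ∈ set_, row ≠ []
instance (set_ : List (List String)) : Decidable (Pre_getSubsetStats set_) := by unfold Pre_getSubsetStats; infer_instance
def pvWitness_getSubsetStats : List (List String) := [["<PER> a <TITREH>"], ["<ACT>", "x"]]

def Spec_getSubsetStats (set_ : List (List String)) (out : List (String × Int)) : Prop := out = getSubsetStats_alt set_
instance (set_ : List (List String)) (out : List (String × Int)) : Decidable (Spec_getSubsetStats set_ out) := by unfold Spec_getSubsetStats; infer_instance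

-- ===== CLAIM (what is proved, stated in full; the proofs are below) =====
def Claim_equal_getSubsetStats : Prop := ∀ (set_ : List (List String)), Dom_getSubsetStats set_ → Pre_getSubsetStats set_ → Spec_getSubsetStats set_ (getSubsetStats set_)

-- ===== LEMMAS AND PROOFS =====

-- positional occurrence count of sub in l (one hit per start position)
def pc (sub : List Char) : List Char → Nat
  | [] => 0
  | c :: t => (if sub.isPrefixOf (c :: t) then 1 else 0) + pc sub t

-- apply g to every nonempty suffix (B's per-position scan, recast on suffixes)
def sufApp (g : List Char → List String) : List Char → List String
  | [] => []
  | c :: t => g (c :: t) ++ sufApp g t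

-- per-row sum of Python str.count, per tag (A's accumulation, one tag)
def tagSum (set_ : List (List String)) (tag : String) : Int :=
  (set_.map (fun row => (PySem.Str.count (PySem.List.pyGetD row 0 "") tag : Int))).sum

theorem getSubsetStats_loop (l : List (List String)) (p a t lo f c : Int) :
    l.foldl
      (fun (acc : Int × Int × Int × Int × Int × Int) (row : List String) =>
        let s := PySem.List.pyGetD row 0 ""
        (acc.1 + (PySem.Str.count s "<PER>" : Int),
         acc.2.1 + (PySem.Str.count s "<ACT>" : Int),
         acc.2.2.1 + (PySem.Str.count s "<TITRE>" : Int)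
                   + (PySem.Str.count s "<TITREH>" : Int)
                   + (PySem.Str.count s "<TITREP>" : Int),
         acc.2.2.2.1 + (PySem.Str.count s "<LOC>" : Int),
         acc.2.2.2.2.1 + (PySem.Str.count s "<FT>" : Int),
         acc.2.2.2.2.2 + (PySem.Str.count s "<CARDINAL>" : Int)))
      (p, a, t, lo, f, c)
    = (p + tagSum l "<PER>", a + tagSum l "<ACT>",
       t + tagSum l "<TITRE>" + tagSum l "<TITREH>" + tagSum l "<TITREP>",
       lo + tagSum l "<LOC>", f + tagSum l "<FT>", c + tagSum l "<CARDINAL>") := by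
  induction l generalizing p a t lo f c with
  | nil => simp [tagSum]
  | cons row rest ih =>
    simp only [List.foldl_cons, ih, tagSum, List.map_cons, List.sum_cons]
    refine Prod.ext ?_ (Prod.ext ?_ (Prod.ext ?_ (Prod.ext ?_ (Prod.ext ?_ ?_)))) <;> simp <;> ring

-- positions inside a block of non-'<' characters contribute no occurrence of a '<'-headed sub
theorem pc_append_no_head (rest m : List Char) (sub : List Char) (hh : sub.head? = some '<')
    (hu : ∀ ch ∈ rest, ch ≠ '<') : pc sub (rest ++ m) = pc sub m := by
  induction rest with
  | nil => rfl
  | cons a u ih =>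
    have ha : a ≠ '<' := hu a (by simp)
    have : ¬ sub.isPrefixOf (a :: (u ++ m)) = true := by
      intro hpre
      rcases sub with _ | ⟨c, r⟩
      · simp at hh
      · simp at hh
        subst hh
        rw [List.isPrefixOf_cons₂] at hpre
        simp at hpre
        exact ha hpre.1.symm
    simp only [List.cons_append, pc, if_neg this]
    simpa using ih (fun ch hc => hu ch (by simp [hc]))

-- the fuel loop of Python str.count equals the positional count when sub starts with '<'
-- and contains '<' nowhere else (so occurrences never overlap)
theorem count_go_eq_pc (sub : List Char) (hh : sub.head? = some '<') (hu : ∀ ch ∈ sub.tail, ch ≠ '<') :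
    ∀ (fuel : Nat) (l : List Char) (acc : Nat), l.length ≤ fuel →
      PySem.Chars.count.go sub fuel l acc = acc + pc sub l := by
  intro fuel
  induction fuel with
  | zero =>
    intro l acc hl
    have : l = [] := List.eq_nil_of_length_eq_zero (Nat.le_zero.mp hl)
    subst this; simp [PySem.Chars.count.go, pc]
  | succ n ih =>
    intro l acc hl
    rcases l with _ | ⟨c, t⟩
    · simp [PySem.Chars.count.go, pc]
    · by_cases hpre : sub.isPrefixOf (c :: t) = true
      · rw [show PySem.Chars.count.go sub (n+1) (c :: t) acc
            = PySem.Chars.count.go sub n ((c :: t).drop sub.length) (acc + 1) by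
              simp [PySem.Chars.count.go, hpre]]
        obtain ⟨m, hm⟩ := (List.isPrefixOf_iff_prefix.mp hpre)
        rcases sub with _ | ⟨c0, r⟩
        · simp at hh
        · simp at hh; subst hh
          have hc : c = '<' ∧ r ++ m = t := by
            have := hm
            simp [List.cons_append] at this
            exact ⟨this.1.symm, this.2⟩
          obtain ⟨rfl, rfl⟩ := hc
          have hdrop : (('<' :: (r ++ m)) : List Char).drop ('<' :: r).length = m := by
            have : ('<' :: (r ++ m)) = ('<' :: r) ++ m := by simp
            rw [this, List.drop_left]
          rw [hdrop]
          have hlm : m.length ≤ n := by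
            have := hl
            simp [List.length_cons, List.length_append] at this ⊢
            omega
          rw [ih m (acc + 1) hlm]
          have hpc : pc ('<' :: r) ('<' :: (r ++ m)) = 1 + pc ('<' :: r) m := by
            simp only [pc, if_pos hpre]
            rw [pc_append_no_head r m ('<' :: r) (by simp) (by simpa using hu)]
          omega
      · rw [show PySem.Chars.count.go sub (n+1) (c :: t) acc
            = PySem.Chars.count.go sub n t acc by simp [PySem.Chars.count.go, hpre]]
        rw [ih t acc (by simpa using Nat.lt_succ_iff.mp (by simpa using hl))]
        simp [pc, hpre]

theorem count_eq_pc (s : String) (sub : List Char) (hne : sub ≠ [])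
    (hh : sub.head? = some '<') (hu : ∀ ch ∈ sub.tail, ch ≠ '<') :
    PySem.Chars.count s.toList sub = pc sub s.toList := by
  rw [PySem.Chars.count]
  rw [if_neg (by simpa [List.isEmpty_iff] using hne)]
  rw [count_go_eq_pc sub hh hu s.toList.length s.toList 0 (le_refl _)]
  omega

-- the index comprehension over range(len(s)) is the suffix scan
theorem flat_range_nat (g : List Char → List String) :
    ∀ cl : List Char, (List.range cl.length).flatMap (fun k => g (cl.drop k)) = sufApp g cl := by
  intro cl
  induction cl with
  | nil => simp [sufApp]
  | cons c t ih =>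
    rw [List.length_cons, List.range_succ_eq_map]
    simp only [List.flatMap_cons, List.flatMap_map, List.drop_zero, sufApp]
    simp [ih]

theorem flat_range_eq_sufApp (g : List Char → List String) (cl : List Char) :
    (PySem.List.pyRange 0 (cl.length : Int) 1).flatMap (fun i => g (cl.drop i.toNat)) = sufApp g cl := by
  rw [PySem.List.pyRange_one, List.flatMap_map]
  rw [show ((cl.length : Int) - 0).toNat = cl.length by omega]
  rw [← flat_range_nat g cl]
  have hfun : (fun (k : Nat) => g (cl.drop ((0 + (k : Int)).toNat))) = fun k => g (cl.drop k) := by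
    funext k; norm_num
  rw [hfun]

-- counting a key in a filterMap-with-if list
theorem count_filterMap_if (k : String) (L : List (String × String)) (l : List Char) :
    (L.filterMap (fun tk => if tk.1.toList <+: l then some tk.2 else none)).count k
    = (L.map (fun tk => if tk.1.toList <+: l ∧ tk.2 = k then 1 else 0)).sum := by
  induction L with
  | nil => rfl
  | cons p rest ih =>
    by_cases hp : p.1.toList <+: l
    · by_cases hk : p.2 = k
      · simp [hp, hk, ih]; omega
      · simp [hp, hk, ih]
    · simp [hp, ih]

-- B's inner per-position emitter
def gB (l : List Char) : List String :=
  tagKey.filterMap (fun tk => if tk.1.toList.isPrefixOf l then some tk.2 else none)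

theorem head_count (k : String) (l : List Char) :
    (gB l).count k = (tagKey.map (fun tk => if tk.1.toList <+: l ∧ tk.2 = k then 1 else 0)).sum := by
  rw [gB]
  rw [show (fun tk : String × String => if tk.1.toList.isPrefixOf l then some tk.2 else none)
      = (fun tk : String × String => if tk.1.toList <+: l then some tk.2 else none) by
    funext tk; simp]
  exact count_filterMap_if k tagKey l

theorem row_PER (cl : List Char) : (sufApp gB cl).count "PER" = pc "<PER>".toList cl := by
  induction cl with
  | nil => rfl
  | cons c t ih =>
    simp only [sufApp, List.count_append, ih, head_count, pc]
    simp [tagKey]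
theorem row_ACT (cl : List Char) : (sufApp gB cl).count "ACT" = pc "<ACT>".toList cl := by
  induction cl with
  | nil => rfl
  | cons c t ih =>
    simp only [sufApp, List.count_append, ih, head_count, pc]
    simp [tagKey]
theorem row_TITRE (cl : List Char) : (sufApp gB cl).count "TITRE"
    = pc "<TITRE>".toList cl + pc "<TITREH>".toList cl + pc "<TITREP>".toList cl := by
  induction cl with
  | nil => rfl
  | cons c t ih =>
    simp only [sufApp, List.count_append, ih, head_count, pc]
    simp [tagKey]
    omega
theorem row_LOC (cl : List Char) : (sufApp gB cl).count "LOC" = pc "<LOC>".toList cl := by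
  induction cl with
  | nil => rfl
  | cons c t ih =>
    simp only [sufApp, List.count_append, ih, head_count, pc]
    simp [tagKey]
theorem row_FT (cl : List Char) : (sufApp gB cl).count "FT" = pc "<FT>".toList cl := by
  induction cl with
  | nil => rfl
  | cons c t ih =>
    simp only [sufApp, List.count_append, ih, head_count, pc]
    simp [tagKey]
theorem row_CARDINAL (cl : List Char) : (sufApp gB cl).count "CARDINAL" = pc "<CARDINAL>".toList cl := by
  induction cl with
  | nil => rfl
  | cons c t ih =>
    simp only [sufApp, List.count_append, ih, head_count, pc]
    simp [tagKey]

-- Python str.count of a tag equals its positional count (tags have '<' only at the start)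
theorem strCount_eq_pc (s : String) (tag : String) (hne : tag.toList ≠ [])
    (hh : tag.toList.head? = some '<') (hu : ∀ ch ∈ tag.toList.tail, ch ≠ '<') :
    PySem.Str.count s tag = pc tag.toList s.toList := by
  rw [PySem.Str.count]
  exact count_eq_pc s tag.toList hne hh hu

def rowsHits (set_ : List (List String)) : List String :=
  set_.flatMap (fun row => sufApp gB (PySem.List.pyGetD row 0 "").toList)

theorem countHits_single (set_ : List (List String)) (k tag : String)
    (hrow : ∀ cl : List Char, (sufApp gB cl).count k = pc tag.toList cl)
    (hne : tag.toList ≠ []) (hh : tag.toList.head? = some '<')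
    (hu : ∀ ch ∈ tag.toList.tail, ch ≠ '<') :
    ((rowsHits set_).count k : Int) = tagSum set_ tag := by
  rw [rowsHits, List.count_flatMap, Nat.cast_list_sum, List.map_map, tagSum]
  congr 1
  apply List.map_congr_left
  intro row _
  simp only [Function.comp]
  rw [hrow, strCount_eq_pc _ tag hne hh hu]

theorem countHits_TITRE (set_ : List (List String)) :
    ((rowsHits set_).count "TITRE" : Int)
    = tagSum set_ "<TITRE>" + tagSum set_ "<TITREH>" + tagSum set_ "<TITREP>" := by
  rw [rowsHits, List.count_flatMap, Nat.cast_list_sum, List.map_map, tagSum, tagSum, tagSum]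
  rw [← PySem.List.sum_map_add_int, ← PySem.List.sum_map_add_int]
  congr 1
  apply List.map_congr_left
  intro row _
  simp only [Function.comp]
  rw [row_TITRE]
  rw [strCount_eq_pc _ "<TITRE>" (by simp) (by simp) (by simp),
      strCount_eq_pc _ "<TITREH>" (by simp) (by simp) (by simp),
      strCount_eq_pc _ "<TITREP>" (by simp) (by simp) (by simp)]
  push_cast
  ring

-- ===== VERDICT (by name: the statement is the Claim_ definition above) =====
theorem getSubsetStats_spec : Claim_equal_getSubsetStats := by
  intro set_ _ _
  unfold Spec_getSubsetStats getSubsetStats getSubsetStats_alt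
  rw [PySem.List.foldl_pyRange_zero_pyGetD' set_ ([] : List String)
      (fun (acc : Int × Int × Int × Int × Int × Int) (row : List String) =>
        let s := PySem.List.pyGetD row 0 ""
        (acc.1 + (PySem.Str.count s "<PER>" : Int),
         acc.2.1 + (PySem.Str.count s "<ACT>" : Int),
         acc.2.2.1 + (PySem.Str.count s "<TITRE>" : Int)
                   + (PySem.Str.count s "<TITREH>" : Int)
                   + (PySem.Str.count s "<TITREP>" : Int),
         acc.2.2.2.1 + (PySem.Str.count s "<LOC>" : Int),
         acc.2.2.2.2.1 + (PySem.Str.count s "<FT>" : Int),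
         acc.2.2.2.2.2 + (PySem.Str.count s "<CARDINAL>" : Int))) (0, 0, 0, 0, 0, 0)]
  rw [getSubsetStats_loop]
  have hB : set_.flatMap (fun row =>
      let s := PySem.List.pyGetD row 0 ""
      (PySem.List.pyRange 0 (PySem.Str.len s) 1).flatMap (fun i =>
        tagKey.filterMap (fun tk =>
          if tk.1.toList.isPrefixOf (s.toList.drop i.toNat) then some tk.2 else none)))
      = rowsHits set_ := by
    rw [rowsHits]
    congr 1
    funext row
    simp only [PySem.Str.len]
    exact flat_range_eq_sufApp gB (PySem.List.pyGetD row 0 "").toList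
  simp only [hB, keys6, List.map_cons, List.map_nil, PySem.List.count_eq]
  rw [countHits_single set_ "PER" "<PER>" row_PER (by simp) (by simp) (by simp),
      countHits_single set_ "ACT" "<ACT>" row_ACT (by simp) (by simp) (by simp),
      countHits_TITRE,
      countHits_single set_ "LOC" "<LOC>" row_LOC (by simp) (by simp) (by simp),
      countHits_single set_ "FT" "<FT>" row_FT (by simp) (by simp) (by simp),
      countHits_single set_ "CARDINAL" "<CARDINAL>" row_CARDINAL (by simp) (by simp) (by simp)]
  simp
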